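-- pv_equiv track=rewrite | github.com/AbduazizKayumov/Algo | python/hackerrank/interview_prep_kit/sorting.py | sort_the_files
-- ===== SOURCE A (Python) =====
-- def sort_the_files(n, result):
--
--     def dfs(filename):
--         if int(filename) > n or len(result) > n:
--             return
--         result.append("IMG" + str(filename) + ".jpg")
--         for c in "0123456789":
--             dfs(filename + c)
--
--     n = min(n, 1000)
--     for c in "123456789":
--         dfs(c)
--     return result
-- ===== SOURCE B (Python) =====
-- def sort_the_files(n, result):
--     cap = min(n, 1000)
--     files = sorted("IMG" + str(k) + ".jpg" for k in range(1, cap + 1))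
--     for name in files:
--         if len(result) > cap:
--             break
--         result.append(name)
--     return result
-- ===== Notes on version B (the rewrite author's own statement) =====
-- stated objective: simpler
-- what changed: A enumerates filenames by a recursive DFS over digit strings with an int(str) parse and a size guard inside the recursion; B builds the min(n,1000) filenames directly with a comprehension, sorts them once (full-string lexicographic order coincides with the DFS emission order because of the common 'IMG' prefix and the '.' terminator, ASCII-below any digit), and appends them to result until the list exceeds the cap.
import Mathlib
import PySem

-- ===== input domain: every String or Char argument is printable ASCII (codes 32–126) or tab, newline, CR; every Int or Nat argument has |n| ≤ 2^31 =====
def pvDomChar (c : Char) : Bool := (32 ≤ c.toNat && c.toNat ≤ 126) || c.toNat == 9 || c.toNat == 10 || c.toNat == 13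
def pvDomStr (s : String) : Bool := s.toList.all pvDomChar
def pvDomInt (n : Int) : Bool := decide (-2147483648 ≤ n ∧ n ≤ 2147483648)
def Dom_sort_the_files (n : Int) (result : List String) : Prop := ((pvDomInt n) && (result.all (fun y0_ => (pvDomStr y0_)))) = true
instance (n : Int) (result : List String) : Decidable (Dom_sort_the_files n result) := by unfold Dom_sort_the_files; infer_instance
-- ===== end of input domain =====

-- B replaces A's recursive filename-DFS by building the filenames directly, sorting them once and
-- appending them until the list exceeds the cap (objective: simpler).  Both Pythons extend the
-- passed-in `result` list in place with the same elements; the equivalence proved here is about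
-- the returned value.

-- ===== PORT A =====
-- "IMG" + f + ".jpg"  (shared string-building helper; both Pythons build this same literal string)
def pvFile (f : List Char) : String :=
  String.ofList ('I' :: 'M' :: 'G' :: (f ++ ['.', 'j', 'p', 'g']))

-- dfs(filename): the inner recursive closure of A.  `fuel` is only a termination guard: from the
-- driver below the recursion depth never exceeds 5 (a 5-digit filename has int value > 1000 ≥ n,
-- so the value guard returns before any deeper call), hence fuel is never exhausted on reachable calls.
def pvDfsA (fuel : Nat) (n : Int) (filename : List Char) (result : List String) : List String :=
  match fuel with
  | 0 => result
  | fuel + 1 =>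
    match PySem.Int.ofChars? filename with
    | none => result      -- int(filename) ValueError: unreachable, filename is a nonempty digit string
    | some v =>
      if v > n ∨ (result.length : Int) > n then result
      else
        ("0123456789".toList).foldl
          (fun r c => pvDfsA fuel n (filename ++ [c]) r)
          (result ++ [pvFile filename])

def sort_the_files (n : Int) (result : List String) : List String :=
  let n := min n 1000
  ("123456789".toList).foldl (fun r c => pvDfsA 5 n [c] r) result

-- ===== PORT B =====
-- the for-loop of B: append each name while len(result) <= cap, break otherwise
def pvAppendCapped (cap : Int) : List String → List String → List String
  | [], r => r
  | x :: xs, r => if (r.length : Int) > cap then r else pvAppendCapped cap xs (r ++ [x])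

def sort_the_files_alt (n : Int) (result : List String) : List String :=
  let cap := min n 1000
  let files := PySem.List.sorted
      ((PySem.List.pyRange 1 (cap + 1)).map (fun k => pvFile (PySem.Int.toChars k)))
      (fun s => s)
  pvAppendCapped cap files result

-- ===== PRECONDITION & SPEC =====
def Spec_sort_the_files (n : Int) (result : List String) (out : List String) : Prop := out = sort_the_files_alt n result
instance (n : Int) (result : List String) (out : List String) : Decidable (Spec_sort_the_files n result out) := by unfold Spec_sort_the_files; infer_instance

-- ===== CLAIM (what is proved, stated in full; the proofs are below) =====
def Claim_equal_sort_the_files : Prop := ∀ (n : Int) (result : List String), Dom_sort_the_files n result → Spec_sort_the_files n result (sort_the_files n result)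

-- ===== LEMMAS AND PROOFS =====

-- ---- parse-of-print facts (int(str(m)) == m for every value the DFS can parse), kernel-checked in chunks ----
def pvChunk (a len : Nat) : Bool :=
  (List.range len).all
    (fun i => PySem.Int.ofChars? (PySem.Int.toChars ((a + i : Nat) : Int)) == some ((a + i : Nat) : Int))

lemma pvChunk_spec {a len : Nat} (h : pvChunk a len = true) {m : Nat}
    (h1 : a ≤ m) (h2 : m < a + len) :
    PySem.Int.ofChars? (PySem.Int.toChars (m : Int)) = some (m : Int) := by
  rw [pvChunk, List.all_eq_true] at h
  have hm : m - a ∈ List.range len := by rw [List.mem_range]; omega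
  have := h _ hm
  rw [beq_iff_eq] at this
  have hma : a + (m - a) = m := by omega
  rwa [hma] at this

set_option maxHeartbeats 4000000 in
set_option maxRecDepth 100000 in
lemma pvChunk0 : pvChunk 1 1000 = true := by decide
set_option maxHeartbeats 4000000 in
set_option maxRecDepth 100000 in
lemma pvChunk1 : pvChunk 1001 1000 = true := by decide
set_option maxHeartbeats 4000000 in
set_option maxRecDepth 100000 in
lemma pvChunk2 : pvChunk 2001 1000 = true := by decide
set_option maxHeartbeats 4000000 in
set_option maxRecDepth 100000 in
lemma pvChunk3 : pvChunk 3001 1000 = true := by decide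
set_option maxHeartbeats 4000000 in
set_option maxRecDepth 100000 in
lemma pvChunk4 : pvChunk 4001 1000 = true := by decide
set_option maxHeartbeats 4000000 in
set_option maxRecDepth 100000 in
lemma pvChunk5 : pvChunk 5001 1000 = true := by decide
set_option maxHeartbeats 4000000 in
set_option maxRecDepth 100000 in
lemma pvChunk6 : pvChunk 6001 1000 = true := by decide
set_option maxHeartbeats 4000000 in
set_option maxRecDepth 100000 in
lemma pvChunk7 : pvChunk 7001 1000 = true := by decide
set_option maxHeartbeats 4000000 in
set_option maxRecDepth 100000 in
lemma pvChunk8 : pvChunk 8001 1000 = true := by decide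
set_option maxHeartbeats 4000000 in
set_option maxRecDepth 100000 in
lemma pvChunk9 : pvChunk 9001 1000 = true := by decide
set_option maxHeartbeats 4000000 in
set_option maxRecDepth 100000 in
lemma pvChunk10 : pvChunk 10001 9 = true := by decide

lemma pvParse_toChars {v : Int} (h1 : 1 ≤ v) (h2 : v ≤ 10009) :
    PySem.Int.ofChars? (PySem.Int.toChars v) = some v := by
  have hv : v = ((v.toNat : Nat) : Int) := by omega
  rw [hv]
  set m := v.toNat with hm
  have hm1 : 1 ≤ m := by omega
  have hm2 : m ≤ 10009 := by omega
  rcases Nat.lt_or_ge m 1001 with h | h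
  · exact pvChunk_spec pvChunk0 (by omega) (by omega)
  · rcases Nat.lt_or_ge m 2001 with h' | h'
    · exact pvChunk_spec pvChunk1 (by omega) (by omega)
    · rcases Nat.lt_or_ge m 3001 with h'' | h''
      · exact pvChunk_spec pvChunk2 (by omega) (by omega)
      · rcases Nat.lt_or_ge m 4001 with h3 | h3
        · exact pvChunk_spec pvChunk3 (by omega) (by omega)
        · rcases Nat.lt_or_ge m 5001 with h4 | h4
          · exact pvChunk_spec pvChunk4 (by omega) (by omega)
          · rcases Nat.lt_or_ge m 6001 with h5 | h5
            · exact pvChunk_spec pvChunk5 (by omega) (by omega)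
            · rcases Nat.lt_or_ge m 7001 with h6 | h6
              · exact pvChunk_spec pvChunk6 (by omega) (by omega)
              · rcases Nat.lt_or_ge m 8001 with h7 | h7
                · exact pvChunk_spec pvChunk7 (by omega) (by omega)
                · rcases Nat.lt_or_ge m 9001 with h8 | h8
                  · exact pvChunk_spec pvChunk8 (by omega) (by omega)
                  · rcases Nat.lt_or_ge m 10001 with h9 | h9
                    · exact pvChunk_spec pvChunk9 (by omega) (by omega)
                    · exact pvChunk_spec pvChunk10 (by omega) (by omega)

lemma pvToChars_inj {v w : Int} (hv1 : 1 ≤ v) (hv2 : v ≤ 10009) (hw1 : 1 ≤ w) (hw2 : w ≤ 10009)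
    (h : PySem.Int.toChars v = PySem.Int.toChars w) : v = w := by
  have h1 := pvParse_toChars hv1 hv2
  have h2 := pvParse_toChars hw1 hw2
  rw [h] at h1; rw [h1] at h2; exact (Option.some_inj.mp h2)

-- ---- the value-level stream of A's DFS, and decimal / string-order facts ----
def pvV (fuel : Nat) (L v : Int) : List Int :=
  match fuel with
  | 0 => []
  | fuel + 1 =>
    if v > L then []
    else v :: List.flatMap (fun (d : Nat) => pvV fuel L (10 * v + (d : Int))) (List.range 10)

def pvT (L : Int) : List Int := List.flatMap (fun (d : Nat) => pvV 5 L ((d : Int) + 1)) (List.range 9)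

def pvFileOf (w : Int) : String := pvFile (PySem.Int.toChars w)

lemma pvToChars_digit {d : Nat} (hd : d < 10) :
    PySem.Int.toChars (d : Int) = [Nat.digitChar d] := by
  rw [PySem.Int.toChars, if_neg (by omega)]
  rw [Int.toNat_natCast]
  exact Nat.toDigits_of_lt_base hd

lemma pvToChars_snoc {v : Int} (h : 1 ≤ v) {d : Nat} (hd : d < 10) :
    PySem.Int.toChars (10 * v + (d : Int)) = PySem.Int.toChars v ++ [Nat.digitChar d] := by
  rw [PySem.Int.toChars, if_neg (by omega), PySem.Int.toChars, if_neg (by omega)]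
  have ht : (10 * v + (d : Int)).toNat = 10 * v.toNat + d := by omega
  rw [ht, ← Nat.toDigits_append_toDigits (by omega) (by omega) hd,
    Nat.toDigits_of_lt_base hd]

lemma pvLex_append_left {x y : List Char} (p : List Char) (h : List.Lex (· < ·) x y) :
    List.Lex (α := Char) (· < ·) (p ++ x) (p ++ y) := by
  induction p with
  | nil => exact h
  | cons a t ih => exact List.Lex.cons ih

lemma pvDot_lt {c : Char} (h : c.isDigit = true) : '.' < c := by
  rw [Char.isDigit] at h
  simp only [Bool.and_eq_true, decide_eq_true_eq] at h
  exact lt_of_lt_of_le (by decide : ('.' : Char) < '0') (by exact h.1)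

lemma pvStr_lt {s t : List Char} (h : List.Lex (· < ·) s t) : String.ofList s < String.ofList t := by
  rw [String.lt_iff_toList_lt]
  simpa using h

lemma pvFile_lt_of_prefix (f t : List Char) (hne : t ≠ []) (hdig : ∀ c ∈ t, c.isDigit = true) :
    pvFile f < pvFile (f ++ t) := by
  apply pvStr_lt
  cases t with
  | nil => exact absurd rfl hne
  | cons c t' =>
    have : ('I' :: 'M' :: 'G' :: (f ++ ['.', 'j', 'p', 'g'])) = ('I' :: 'M' :: 'G' :: f) ++ ['.', 'j', 'p', 'g'] := by simp
    rw [this]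
    have : ('I' :: 'M' :: 'G' :: ((f ++ c :: t') ++ ['.', 'j', 'p', 'g'])) = ('I' :: 'M' :: 'G' :: f) ++ (c :: (t' ++ ['.', 'j', 'p', 'g'])) := by simp
    rw [this]
    exact pvLex_append_left _ (List.Lex.rel (pvDot_lt (hdig c (by simp))))

lemma pvFile_lt_of_diverge (f : List Char) {c c' : Char} (t t' : List Char) (h : c < c') :
    pvFile (f ++ c :: t) < pvFile (f ++ c' :: t') := by
  apply pvStr_lt
  have e1 : ('I' :: 'M' :: 'G' :: ((f ++ c :: t) ++ ['.', 'j', 'p', 'g'])) = ('I' :: 'M' :: 'G' :: f) ++ (c :: (t ++ ['.', 'j', 'p', 'g'])) := by simp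
  have e2 : ('I' :: 'M' :: 'G' :: ((f ++ c' :: t') ++ ['.', 'j', 'p', 'g'])) = ('I' :: 'M' :: 'G' :: f) ++ (c' :: (t' ++ ['.', 'j', 'p', 'g'])) := by simp
  have h3 := pvLex_append_left ('I' :: 'M' :: 'G' :: f)
    (List.Lex.rel (l₁ := t ++ ['.', 'j', 'p', 'g']) (l₂ := t' ++ ['.', 'j', 'p', 'g']) h)
  rw [← e1, ← e2] at h3
  exact h3

lemma pvFile_inj {f g : List Char} (h : pvFile f = pvFile g) : f = g := by
  rw [pvFile, pvFile] at h
  have h2 := congrArg String.toList h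
  simp at h2
  exact h2

lemma pvTake_budget (r : List String) (xs ys : List String) (n : Int) :
    (r ++ xs.take ((n + 1 - (r.length : Int)).toNat)) ++
        ys.take ((n + 1 - ((r ++ xs.take ((n + 1 - (r.length : Int)).toNat)).length : Int)).toNat)
      = r ++ (xs ++ ys).take ((n + 1 - (r.length : Int)).toNat) := by
  rw [List.append_assoc, List.take_append]
  congr 2
  simp [List.length_take]
  omega

lemma pvFold_eq (fuel : Nat) (n : Int)
    (hdfs : ∀ (v : Int), 1 ≤ v → v ≤ 10009 → ∀ r,
      pvDfsA fuel n (PySem.Int.toChars v) r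
        = r ++ ((pvV fuel n v).map pvFileOf).take ((n + 1 - (r.length : Int)).toNat)) :
    ∀ (ds : List Int), (∀ w ∈ ds, 1 ≤ w ∧ w ≤ 10009) → ∀ r,
      ds.foldl (fun r w => pvDfsA fuel n (PySem.Int.toChars w) r) r
        = r ++ ((ds.flatMap (fun w => pvV fuel n w)).map pvFileOf).take
            ((n + 1 - (r.length : Int)).toNat) := by
  intro ds
  induction ds with
  | nil => intro _ r; simp
  | cons w ds ih =>
    intro hb r
    have hw := hb w (by simp)
    rw [List.foldl_cons, hdfs w hw.1 hw.2 r, ih (fun x hx => hb x (by simp [hx])),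
      pvTake_budget, List.flatMap_cons, List.map_append]

lemma pvDfs_eq (fuel : Nat) (n : Int) (hn : n ≤ 1000) :
    ∀ (v : Int), 1 ≤ v → v ≤ 10009 → ∀ r,
      pvDfsA fuel n (PySem.Int.toChars v) r
        = r ++ ((pvV fuel n v).map pvFileOf).take ((n + 1 - (r.length : Int)).toNat) := by
  induction fuel with
  | zero => intro v h1 h2 r; simp [pvDfsA, pvV]
  | succ fuel ih =>
    intro v h1 h2 r
    have hp := pvParse_toChars h1 h2
    simp only [pvDfsA, hp]
    by_cases hv : v > n
    · rw [if_pos (Or.inl hv)]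
      simp [pvV, if_pos hv]
    · by_cases hl : (r.length : Int) > n
      · rw [if_pos (Or.inr hl)]
        have : (n + 1 - (r.length : Int)).toNat = 0 := by omega
        simp [this]
      · rw [if_neg (by tauto)]
        have hdig : "0123456789".toList = (List.range 10).map Nat.digitChar := by decide
        rw [hdig, List.foldl_map]
        have hcong : ∀ (r' : List String) (d : Nat), d ∈ List.range 10 →
            pvDfsA fuel n (PySem.Int.toChars v ++ [Nat.digitChar d]) r'
              = pvDfsA fuel n (PySem.Int.toChars (10 * v + (d : Int))) r' := by
          intro r' d hd
          rw [pvToChars_snoc h1 (List.mem_range.mp hd)]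
        rw [PySem.List.foldl_congr_mem (List.range 10) _
              (fun (r' : List String) (d : Nat) => pvDfsA fuel n (PySem.Int.toChars (10 * v + (d : Int))) r') _ hcong]
        have hfm := List.foldl_map (f := fun (d : Nat) => 10 * v + (d : Int))
          (g := fun (r'' : List String) (w : Int) => pvDfsA fuel n (PySem.Int.toChars w) r'')
          (l := List.range 10) (init := r ++ [pvFile (PySem.Int.toChars v)])
        rw [← hfm]
        rw [pvFold_eq fuel n ih (List.map (fun (d : Nat) => 10 * v + (d : Int)) (List.range 10))
            (by
              intro w hw
              simp only [List.mem_map, List.mem_range] at hw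
              obtain ⟨d, hd, rfl⟩ := hw
              constructor <;> omega)]
        rw [List.flatMap_map]
        conv_rhs => rw [pvV]
        rw [if_neg hv, List.map_cons]
        have hk : (n + 1 - (r.length : Int)).toNat = ((n + 1 - ((r.length : Int) + 1)).toNat) + 1 := by omega
        rw [hk, List.take_succ_cons]
        have hlen : (((r ++ [pvFile (PySem.Int.toChars v)]).length : Nat) : Int) = (r.length : Int) + 1 := by
          simp
        rw [hlen]
        simp [List.append_assoc, pvFileOf]

lemma pvPortA_eq (n : Int) (r : List String) :
    sort_the_files n r
      = r ++ ((pvT (min n 1000)).map pvFileOf).take ((min n 1000 + 1 - (r.length : Int)).toNat) := by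
  show ("123456789".toList).foldl (fun r c => pvDfsA 5 (min n 1000) [c] r) r = _
  have hdig : "123456789".toList = (List.range 9).map (fun d => Nat.digitChar (d + 1)) := by decide
  rw [hdig, List.foldl_map]
  have hcong : ∀ (r' : List String) (d : Nat), d ∈ List.range 9 →
      pvDfsA 5 (min n 1000) [Nat.digitChar (d + 1)] r'
        = pvDfsA 5 (min n 1000) (PySem.Int.toChars ((d : Int) + 1)) r' := by
    intro r' d hd
    have : ((d : Int) + 1) = (((d + 1 : Nat) : Nat) : Int) := by push_cast; ring
    rw [this, pvToChars_digit (by have := List.mem_range.mp hd; omega)]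
  rw [PySem.List.foldl_congr_mem (List.range 9) _
        (fun (r' : List String) (d : Nat) => pvDfsA 5 (min n 1000) (PySem.Int.toChars ((d : Int) + 1)) r') _ hcong]
  have hfm := List.foldl_map (f := fun (d : Nat) => (d : Int) + 1)
    (g := fun (r'' : List String) (w : Int) => pvDfsA 5 (min n 1000) (PySem.Int.toChars w) r'')
    (l := List.range 9) (init := r)
  rw [← hfm]
  rw [pvFold_eq 5 (min n 1000) (pvDfs_eq 5 (min n 1000) (min_le_right _ _))
      (List.map (fun (d : Nat) => (d : Int) + 1) (List.range 9))
      (by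
        intro w hw
        simp only [List.mem_map, List.mem_range] at hw
        obtain ⟨d, hd, rfl⟩ := hw
        constructor <;> omega)]
  rw [List.flatMap_map]
  rfl

-- B's for-loop appends exactly the take of the remaining budget
lemma pvAppendCapped_eq (cap : Int) :
    ∀ (xs r : List String),
      pvAppendCapped cap xs r = r ++ xs.take ((cap + 1 - (r.length : Int)).toNat) := by
  intro xs
  induction xs with
  | nil => intro r; simp [pvAppendCapped]
  | cons x xs ih =>
    intro r
    rw [pvAppendCapped]
    by_cases h : (r.length : Int) > cap
    · rw [if_pos h]
      have h0 : (cap + 1 - (r.length : Int)).toNat = 0 := by omega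
      simp [h0]
    · rw [if_neg h, ih]
      have hlen : (((r ++ [x]).length : Nat) : Int) = (r.length : Int) + 1 := by simp
      rw [hlen]
      have hk : (cap + 1 - (r.length : Int)).toNat = ((cap + 1 - ((r.length : Int) + 1)).toNat) + 1 := by omega
      rw [hk, List.take_succ_cons]
      simp

lemma pvPortB_eq (n : Int) (r : List String) :
    sort_the_files_alt n r
      = r ++ (PySem.List.sorted ((PySem.List.pyRange 1 (min n 1000 + 1)).map pvFileOf) (fun s => s)).take
          ((min n 1000 + 1 - (r.length : Int)).toNat) := by
  show pvAppendCapped (min n 1000)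
      (PySem.List.sorted ((PySem.List.pyRange 1 (min n 1000 + 1)).map pvFileOf) (fun s => s)) r = _
  rw [pvAppendCapped_eq]

lemma pvMem_pvV (fuel : Nat) (L : Int) :
    ∀ (v w : Int), 1 ≤ v →
      (w ∈ pvV fuel L v ↔ w ≤ L ∧ ∃ k : Nat, k < fuel ∧ v * 10 ^ k ≤ w ∧ w < (v + 1) * 10 ^ k) := by
  induction fuel with
  | zero => intro v w hv; simp [pvV]
  | succ fuel ih =>
    intro v w hv
    rw [pvV]
    by_cases hvL : v > L
    · rw [if_pos hvL]
      simp only [List.not_mem_nil, false_iff]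
      rintro ⟨hwL, k, _, h1, _⟩
      have hpk : (1 : Int) ≤ 10 ^ k := one_le_pow₀ (by omega)
      nlinarith
    · rw [if_neg hvL]
      simp only [List.mem_cons, List.mem_flatMap, List.mem_range]
      constructor
      · rintro (rfl | ⟨d, hd, hmem⟩)
        · exact ⟨by omega, 0, by omega, by simp⟩
        · obtain ⟨hwL, k, hk, h1, h2⟩ := (ih (10 * v + (d : Int)) w (by omega)).mp hmem
          have hp : (0 : Int) ≤ 10 ^ k := by positivity
          refine ⟨hwL, k + 1, by omega, ?_, ?_⟩
          · calc v * 10 ^ (k + 1) = (10 * v) * 10 ^ k := by ring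
              _ ≤ (10 * v + (d : Int)) * 10 ^ k := by
                  apply mul_le_mul_of_nonneg_right (by omega) hp
              _ ≤ w := h1
          · calc w < (10 * v + (d : Int) + 1) * 10 ^ k := h2
              _ ≤ (10 * v + 10) * 10 ^ k := by
                  apply mul_le_mul_of_nonneg_right (by omega) hp
              _ = (v + 1) * 10 ^ (k + 1) := by ring
      · rintro ⟨hwL, k, hk, h1, h2⟩
        match k with
        | 0 =>
          left
          simp only [pow_zero, mul_one] at h1 h2
          omega
        | k + 1 =>
          right
          have hp : (0 : Int) < 10 ^ k := by positivity
          set b : Int := 10 ^ k with hb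
          set q : Int := w / b with hq
          have hdm : b * q + w % b = w := Int.mul_ediv_add_emod w b
          have hm0 : 0 ≤ w % b := Int.emod_nonneg w (by omega : b ≠ 0)
          have hmb : w % b < b := Int.emod_lt_of_pos w hp
          have hbq_le : b * q ≤ w := by omega
          have hw_lt : w < b * q + b := by omega
          have hql : 10 * v ≤ q := by
            have h1' : (10 * v) * b ≤ w := by
              calc (10 * v) * b = v * 10 ^ (k + 1) := by rw [hb]; ring
                _ ≤ w := h1
            by_contra hcon
            have hstep : b * (q + 1) ≤ b * (10 * v) := by
              apply mul_le_mul_of_nonneg_left (by omega) (le_of_lt hp)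
            nlinarith
          have hqu : q < 10 * v + 10 := by
            have h2' : w < (10 * v + 10) * b := by
              calc w < (v + 1) * 10 ^ (k + 1) := h2
                _ = (10 * v + 10) * b := by rw [hb]; ring
            by_contra hcon
            have hstep : b * (10 * v + 10) ≤ b * q := by
              apply mul_le_mul_of_nonneg_left (by omega) (le_of_lt hp)
            nlinarith
          have hcast : (((q - 10 * v).toNat : Nat) : Int) = q - 10 * v := by omega
          refine ⟨(q - 10 * v).toNat, by omega,
            (ih (10 * v + ((q - 10 * v).toNat : Int)) w (by omega)).mpr ⟨hwL, k, by omega, ?_, ?_⟩⟩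
          · rw [hcast]
            have he : (10 * v + (q - 10 * v)) * 10 ^ k = b * q := by rw [hb]; ring
            rw [he]
            exact hbq_le
          · rw [hcast]
            have he : (10 * v + (q - 10 * v) + 1) * 10 ^ k = b * q + b := by rw [hb]; ring
            rw [he]
            exact hw_lt

lemma pvMem_pvT {L : Int} (hL : L ≤ 1000) (w : Int) : w ∈ pvT L ↔ 1 ≤ w ∧ w ≤ L := by
  rw [pvT, List.mem_flatMap]
  constructor
  · rintro ⟨d, hd, hmem⟩
    obtain ⟨hwL, k, hk, h1, h2⟩ := (pvMem_pvV 5 L ((d : Int) + 1) w (by omega)).mp hmem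
    have hpk : (1 : Int) ≤ 10 ^ k := one_le_pow₀ (by omega)
    have hd9 : (d : Int) ≥ 0 := by omega
    refine ⟨?_, hwL⟩
    nlinarith
  · rintro ⟨h1, h2⟩
    have hw1000 : w ≤ 1000 := le_trans h2 hL
    rcases (by omega : w < 10 ∨ (10 ≤ w ∧ w < 100) ∨ (100 ≤ w ∧ w < 1000) ∨ (1000 ≤ w ∧ w < 10000)) with h | h | h | h
    · refine ⟨(w - 1).toNat, List.mem_range.mpr (by omega),
        (pvMem_pvV 5 L (((w - 1).toNat : Int) + 1) w (by omega)).mpr ⟨h2, 0, by omega, ?_, ?_⟩⟩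
      · have hc : (((w - 1).toNat : Nat) : Int) = w - 1 := by omega
        rw [hc, pow_zero]; omega
      · have hc : (((w - 1).toNat : Nat) : Int) = w - 1 := by omega
        rw [hc, pow_zero]; omega
    · refine ⟨(w / 10 - 1).toNat, List.mem_range.mpr (by omega),
        (pvMem_pvV 5 L (((w / 10 - 1).toNat : Int) + 1) w (by omega)).mpr ⟨h2, 1, by omega, ?_, ?_⟩⟩
      · have hc : (((w / 10 - 1).toNat : Nat) : Int) = w / 10 - 1 := by omega
        rw [hc, pow_one]; omega
      · have hc : (((w / 10 - 1).toNat : Nat) : Int) = w / 10 - 1 := by omega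
        rw [hc, pow_one]; omega
    · refine ⟨(w / 100 - 1).toNat, List.mem_range.mpr (by omega),
        (pvMem_pvV 5 L (((w / 100 - 1).toNat : Int) + 1) w (by omega)).mpr ⟨h2, 2, by omega, ?_, ?_⟩⟩
      · have hc : (((w / 100 - 1).toNat : Nat) : Int) = w / 100 - 1 := by omega
        rw [hc, show (10:Int)^2 = 100 by norm_num]; omega
      · have hc : (((w / 100 - 1).toNat : Nat) : Int) = w / 100 - 1 := by omega
        rw [hc, show (10:Int)^2 = 100 by norm_num]; omega
    · refine ⟨(w / 1000 - 1).toNat, List.mem_range.mpr (by omega),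
        (pvMem_pvV 5 L (((w / 1000 - 1).toNat : Int) + 1) w (by omega)).mpr ⟨h2, 3, by omega, ?_, ?_⟩⟩
      · have hc : (((w / 1000 - 1).toNat : Nat) : Int) = w / 1000 - 1 := by omega
        rw [hc, show (10:Int)^3 = 1000 by norm_num]; omega
      · have hc : (((w / 1000 - 1).toNat : Nat) : Int) = w / 1000 - 1 := by omega
        rw [hc, show (10:Int)^3 = 1000 by norm_num]; omega

lemma pvDigitChar_isDigit : ∀ d, d < 10 → (Nat.digitChar d).isDigit = true := by decide

lemma pvDigitChar_lt : ∀ d, d < 10 → ∀ d', d' < 10 → d < d' → Nat.digitChar d < Nat.digitChar d' := by decide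

lemma pvV_prefix (fuel : Nat) (L : Int) :
    ∀ (v w : Int), 1 ≤ v → w ∈ pvV fuel L v →
      ∃ t, (∀ c ∈ t, c.isDigit = true) ∧ PySem.Int.toChars w = PySem.Int.toChars v ++ t := by
  induction fuel with
  | zero => intro v w _ h; simp [pvV] at h
  | succ fuel ih =>
    intro v w hv h
    rw [pvV] at h
    by_cases hvL : v > L
    · rw [if_pos hvL] at h; simp at h
    · rw [if_neg hvL] at h
      rcases List.mem_cons.mp h with rfl | h
      · exact ⟨[], by simp, by simp⟩
      · obtain ⟨d, hd, hmem⟩ := List.mem_flatMap.mp h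
        have hd10 := List.mem_range.mp hd
        obtain ⟨t, ht, he⟩ := ih (10 * v + (d : Int)) w (by omega) hmem
        refine ⟨Nat.digitChar d :: t, ?_, ?_⟩
        · intro c hc
          rcases List.mem_cons.mp hc with rfl | hc
          · exact pvDigitChar_isDigit d hd10
          · exact ht c hc
        · rw [he, pvToChars_snoc hv hd10]
          simp
-- prefix of any stream element, phrased for cross comparisons

lemma pvV_shape (fuel : Nat) (L v : Int) (hv : 1 ≤ v) {d : Nat} (hd : d < 10) {w : Int}
    (h : w ∈ pvV fuel L (10 * v + (d : Int))) :
    ∃ t, PySem.Int.toChars w = PySem.Int.toChars v ++ Nat.digitChar d :: t := by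
  obtain ⟨t, _, he⟩ := pvV_prefix fuel L (10 * v + (d : Int)) w (by omega) h
  exact ⟨t, by rw [he, pvToChars_snoc hv hd]; simp⟩

lemma pvPairwise_flatMap {R : Int → Int → Prop} (g : Nat → List Int) (m : Nat)
    (hin : ∀ d, d < m → (g d).Pairwise R)
    (hcross : ∀ d d', d < d' → d' < m → ∀ x ∈ g d, ∀ y ∈ g d', R x y) :
    (List.flatMap g (List.range m)).Pairwise R := by
  induction m with
  | zero => simp
  | succ m ih =>
    rw [List.range_succ, List.flatMap_append]
    rw [List.pairwise_append]
    refine ⟨ih (fun d hd => hin d (by omega)) (fun d d' h1 h2 => hcross d d' h1 (by omega)), ?_, ?_⟩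
    · simp only [List.flatMap_cons, List.flatMap_nil, List.append_nil]
      exact hin m (by omega)
    · intro a ha b hb
      simp only [List.flatMap_cons, List.flatMap_nil, List.append_nil] at hb
      obtain ⟨d, hd, hmem⟩ := List.mem_flatMap.mp ha
      exact hcross d m (List.mem_range.mp hd) (by omega) a hmem b hb

lemma pvPairwise_pvV (fuel : Nat) (L : Int) :
    ∀ (v : Int), 1 ≤ v → (pvV fuel L v).Pairwise (fun a b => pvFileOf a < pvFileOf b) := by
  induction fuel with
  | zero => intro v _; simp [pvV]
  | succ fuel ih =>
    intro v hv
    rw [pvV]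
    by_cases hvL : v > L
    · simp [if_pos hvL]
    · rw [if_neg hvL]
      refine List.Pairwise.cons ?_ ?_
      · intro b hb
        obtain ⟨d, hd, hmem⟩ := List.mem_flatMap.mp hb
        obtain ⟨t, he⟩ := pvV_shape fuel L v hv (List.mem_range.mp hd) hmem
        show pvFile (PySem.Int.toChars v) < pvFile (PySem.Int.toChars b)
        rw [he]
        exact pvFile_lt_of_prefix _ _ (by simp)
          (by
            intro c hc
            rcases List.mem_cons.mp hc with rfl | hc
            · exact pvDigitChar_isDigit d (List.mem_range.mp hd)
            · have := pvV_prefix fuel L (10 * v + (d : Int)) b (by have := List.mem_range.mp hd; omega) hmem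
              obtain ⟨t', ht', he'⟩ := this
              rw [pvToChars_snoc hv (List.mem_range.mp hd)] at he'
              have htt : t = t' := by
                have := he.symm.trans he'
                simpa using this
              exact ht' c (htt ▸ hc))
      · exact pvPairwise_flatMap _ 10
          (fun d hd => ih (10 * v + (d : Int)) (by omega))
          (fun d d' h1 h2 x hx y hy => by
            obtain ⟨tx, hex⟩ := pvV_shape fuel L v hv (by omega) hx
            obtain ⟨ty, hey⟩ := pvV_shape fuel L v hv h2 hy
            show pvFile (PySem.Int.toChars x) < pvFile (PySem.Int.toChars y)
            rw [hex, hey]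
            exact pvFile_lt_of_diverge _ _ _ (pvDigitChar_lt d (by omega) d' h2 h1))

lemma pvPairwise_pvT (L : Int) :
    (pvT L).Pairwise (fun a b => pvFileOf a < pvFileOf b) := by
  rw [pvT]
  refine pvPairwise_flatMap _ 9 (fun d hd => pvPairwise_pvV 5 L _ (by omega)) ?_
  intro d d' h1 h2 x hx y hy
  have hx' : x ∈ pvV 5 L ((d : Int) + 1) := hx
  have hy' : y ∈ pvV 5 L ((d' : Int) + 1) := hy
  obtain ⟨tx, _, hex⟩ := pvV_prefix 5 L ((d : Int) + 1) x (by omega) hx'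
  obtain ⟨ty, _, hey⟩ := pvV_prefix 5 L ((d' : Int) + 1) y (by omega) hy'
  show pvFile (PySem.Int.toChars x) < pvFile (PySem.Int.toChars y)
  have hdx : ((d : Int) + 1) = (((d + 1 : Nat) : Nat) : Int) := by push_cast; ring
  have hdy : ((d' : Int) + 1) = (((d' + 1 : Nat) : Nat) : Int) := by push_cast; ring
  rw [hdx, pvToChars_digit (by omega)] at hex
  rw [hdy, pvToChars_digit (by omega)] at hey
  rw [hex, hey]
  have := pvFile_lt_of_diverge [] (c := Nat.digitChar (d + 1)) (c' := Nat.digitChar (d' + 1)) tx ty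
    (pvDigitChar_lt (d + 1) (by omega) (d' + 1) (by omega) (by omega))
  simpa using this

lemma pvFileOf_inj {v w : Int} (hv1 : 1 ≤ v) (hv2 : v ≤ 10009) (hw1 : 1 ≤ w) (hw2 : w ≤ 10009)
    (h : pvFileOf v = pvFileOf w) : v = w :=
  pvToChars_inj hv1 hv2 hw1 hw2 (pvFile_inj h)

lemma pvSorted_eq {L : Int} (hL : L ≤ 1000) :
    PySem.List.sorted ((PySem.List.pyRange 1 (L + 1)).map pvFileOf) (fun s => s)
      = (pvT L).map pvFileOf := by
  apply PySem.List.sorted_eq_of_perm_of_pairwise_lt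
  · apply (List.perm_ext_iff_of_nodup ?_ ?_).mpr
    · intro s
      simp only [List.mem_map]
      constructor
      · rintro ⟨w, hw, rfl⟩
        have := (pvMem_pvT hL w).mp hw
        exact ⟨w, PySem.List.mem_pyRange_one.mpr (by omega), rfl⟩
      · rintro ⟨w, hw, rfl⟩
        have := PySem.List.mem_pyRange_one.mp hw
        exact ⟨w, (pvMem_pvT hL w).mpr (by omega), rfl⟩
    · exact List.Pairwise.imp (fun h => ne_of_lt h) (List.pairwise_map.mpr (pvPairwise_pvT L))
    · apply List.Nodup.map_on
      · intro x hx y hy hxy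
        have hx' := PySem.List.mem_pyRange_one.mp hx
        have hy' := PySem.List.mem_pyRange_one.mp hy
        exact pvFileOf_inj (by omega) (by omega) (by omega) (by omega) hxy
      · exact PySem.List.nodup_pyRange_one _ _
  · exact List.pairwise_map.mpr (pvPairwise_pvT L)

-- ===== VERDICT (by name: the statement is the Claim_ definition above) =====
theorem sort_the_files_spec : Claim_equal_sort_the_files := by
  intro n r _
  unfold Spec_sort_the_files
  have hL : min n 1000 ≤ 1000 := min_le_right _ _
  rw [pvPortA_eq, pvPortB_eq, pvSorted_eq hL]
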